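-- pv_equiv track=rewrite | github.com/GiantRavens/markdown_forge | tools/acrobat-pdf-markdown_cleanup.py | merge_split_paragraphs
-- ===== SOURCE A (Python) =====
-- def should_merge_paragraphs(prev_line: str, next_line: str) -> bool:
--     """Heuristically decide if two lines should form one continuous paragraph."""
--     prev = prev_line.rstrip()
--     if not prev:
--         return False
--     first_char = next_line.lstrip()[:1]
--     if not first_char or not first_char.islower():
--         return False
--     if prev.endswith((".", "!", "?", ":", ";", "—", "–")):
--         return False
--     if next_line.lstrip().startswith(("#", "-", "*", ">", "```")):
--         return False
--     return True
--
-- def merge_split_paragraphs(text: str) -> str: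
--     """Rejoin paragraphs Acrobat split with blank lines but mid-sentence."""
--     lines = text.splitlines()
--     merged: list[str] = []
--     i = 0
--     while i < len(lines):
--         line = lines[i]
--         if line.strip() == "" and merged:
--             j = i + 1
--             while j < len(lines) and lines[j].strip() == "":
--                 j += 1
--             if j < len(lines) and should_merge_paragraphs(merged[-1], lines[j]):
--                 merged[-1] = merged[-1].rstrip() + " " + lines[j].lstrip()
--                 i = j + 1
--                 continue
--         merged.append(line)
--         i += 1
--     return "\n".join(merged)
-- ===== SOURCE B (Python) =====
-- def should_merge_paragraphs(prev_line: str, next_line: str) -> bool: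
--     """Heuristically decide if two lines should form one continuous paragraph."""
--     prev = prev_line.rstrip()
--     if not prev:
--         return False
--     first_char = next_line.lstrip()[:1]
--     if not first_char or not first_char.islower():
--         return False
--     if prev.endswith((".", "!", "?", ":", ";", "—", "–")):
--         return False
--     if next_line.lstrip().startswith(("#", "-", "*", ">", "```")):
--         return False
--     return True
--
-- def merge_split_paragraphs(text: str) -> str:
--     """Single forward pass: buffer blank lines, decide merge at the next non-blank line."""
--     merged: list[str] = []
--     pending: list[str] = []
--     for line in text.splitlines():
--         if line.strip() == "":
--             pending.append(line)
--         elif merged and pending and should_merge_paragraphs(merged[-1], line):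
--             merged[-1] = merged[-1].rstrip() + " " + line.lstrip()
--             pending = []
--         else:
--             merged.extend(pending)
--             pending = []
--             merged.append(line)
--     merged.extend(pending)
--     return "\n".join(merged)
-- ===== Notes on version B (the rewrite author's own statement) =====
-- stated objective: simpler
-- what changed: Replaces A's index-based while loop with a re-scanning lookahead (an inner while that skips ahead over blank lines at every blank) by a single forward pass that buffers blank lines in a pending list and decides the merge once, at the next non-blank line, flushing the buffer verbatim on a non-merge and at EOF.
import Mathlib
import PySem

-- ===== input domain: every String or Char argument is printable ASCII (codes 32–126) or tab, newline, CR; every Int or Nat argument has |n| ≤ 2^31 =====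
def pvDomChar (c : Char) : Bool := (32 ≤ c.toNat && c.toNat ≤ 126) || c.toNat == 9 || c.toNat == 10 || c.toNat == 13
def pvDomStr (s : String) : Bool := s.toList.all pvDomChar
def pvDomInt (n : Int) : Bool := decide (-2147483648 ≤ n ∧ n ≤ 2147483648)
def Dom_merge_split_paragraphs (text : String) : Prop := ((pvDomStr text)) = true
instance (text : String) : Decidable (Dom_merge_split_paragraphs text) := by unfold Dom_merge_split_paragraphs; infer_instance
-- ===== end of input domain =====

-- B replaces A's lookahead (inner blank-skipping while loop) by a single forward pass
-- that buffers blank lines and decides the merge at the next non-blank line (objective: simpler).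

-- shared same-module helper of both Pythons: should_merge_paragraphs
-- (next_line.lstrip()[:1] and its .islower() are ported by hand via toList.take 1 /
-- PySem.Chars.islower — exact for a single code point on the stated ASCII domain)
def pvShouldMerge (prev_line next_line : String) : Bool :=
  let prev := PySem.Str.rstrip prev_line
  if prev == "" then false
  else
    match (PySem.Str.lstrip next_line).toList.take 1 with
    | [] => false
    | c :: _ =>
      if !PySem.Chars.islower c then false
      else if PySem.Str.endswith prev "." || PySem.Str.endswith prev "!" ||
              PySem.Str.endswith prev "?" || PySem.Str.endswith prev ":" ||
              PySem.Str.endswith prev ";" || PySem.Str.endswith prev "—" ||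
              PySem.Str.endswith prev "–" then false
      else if PySem.Str.startswith (PySem.Str.lstrip next_line) "#" ||
              PySem.Str.startswith (PySem.Str.lstrip next_line) "-" ||
              PySem.Str.startswith (PySem.Str.lstrip next_line) "*" ||
              PySem.Str.startswith (PySem.Str.lstrip next_line) ">" ||
              PySem.Str.startswith (PySem.Str.lstrip next_line) "```" then false
      else true

-- ===== PORT A =====
-- A's inner `while j < len(lines) and lines[j].strip() == "": j += 1` on the suffix
def pvSkipBlanks : List String → List String
  | [] => []
  | l :: rest => if PySem.Str.strip l == "" then pvSkipBlanks rest else l :: rest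

theorem pvSkipBlanks_length_le (xs : List String) : (pvSkipBlanks xs).length ≤ xs.length := by
  induction xs with
  | nil => simp [pvSkipBlanks]
  | cons l rest ih =>
    simp only [pvSkipBlanks]
    split
    · exact Nat.le_trans ih (Nat.le_succ _)
    · simp

-- A's outer while loop over the suffix of lines, carrying `merged`
def pvMergeLoopA : List String → List String → List String
  | [], merged => merged
  | line :: rest, merged =>
    if (PySem.Str.strip line == "") && !merged.isEmpty then
      match h : pvSkipBlanks rest with
      | l' :: rest'' =>
        if pvShouldMerge (merged.getLastD "") l' then
          pvMergeLoopA rest''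
            (merged.dropLast ++ [PySem.Str.rstrip (merged.getLastD "") ++ " " ++ PySem.Str.lstrip l'])
        else
          pvMergeLoopA rest (merged ++ [line])
      | [] => pvMergeLoopA rest (merged ++ [line])
    else
      pvMergeLoopA rest (merged ++ [line])
termination_by l _ => l.length
decreasing_by
  · have hle : (pvSkipBlanks rest).length ≤ rest.length := pvSkipBlanks_length_le rest
    rw [h] at hle
    simp at hle ⊢
    omega
  · simp
  · simp
  · simp

def merge_split_paragraphs (text : String) : String :=
  PySem.Str.join "\n" (pvMergeLoopA (PySem.Str.splitlines text) [])

-- ===== PORT B =====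
-- one step of B's single forward pass; state = (merged, pending blank-line buffer)
def pvMergeStepB (st : List String × List String) (line : String) : List String × List String :=
  if PySem.Str.strip line == "" then (st.1, st.2 ++ [line])
  else if !st.1.isEmpty && !st.2.isEmpty && pvShouldMerge (st.1.getLastD "") line then
    (st.1.dropLast ++ [PySem.Str.rstrip (st.1.getLastD "") ++ " " ++ PySem.Str.lstrip line], [])
  else
    (st.1 ++ st.2 ++ [line], [])

def merge_split_paragraphs_alt (text : String) : String :=
  let st := (PySem.Str.splitlines text).foldl pvMergeStepB ([], [])
  PySem.Str.join "\n" (st.1 ++ st.2)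

-- ===== PRECONDITION & SPEC =====
def Spec_merge_split_paragraphs (text : String) (out : String) : Prop := out = merge_split_paragraphs_alt text
instance (text : String) (out : String) : Decidable (Spec_merge_split_paragraphs text out) := by unfold Spec_merge_split_paragraphs; infer_instance

-- ===== CLAIM (what is proved, stated in full; the proofs are below) =====
def Claim_equal_merge_split_paragraphs : Prop := ∀ (text : String), Dom_merge_split_paragraphs text → Spec_merge_split_paragraphs text (merge_split_paragraphs text)

-- ===== LEMMAS AND PROOFS =====

-- B's run, as a function of the remaining lines and the state
def pvGoB (lines : List String) (st : List String × List String) : List String :=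
  let st' := lines.foldl pvMergeStepB st
  st'.1 ++ st'.2

theorem pvGoB_cons (l : String) (rest : List String) (st : List String × List String) :
    pvGoB (l :: rest) st = pvGoB rest (pvMergeStepB st l) := rfl

theorem pvDropWhileHead {α : Type} {p : α → Bool} :
    ∀ {xs : List α} {a : α} {t : List α}, xs.dropWhile p = a :: t → p a = false := by
  intro xs
  induction xs with
  | nil => intro a t h; simp [List.dropWhile] at h
  | cons x xs ih =>
    intro a t h
    rw [List.dropWhile_cons] at h
    split_ifs at h with hx
    · exact ih h
    · cases h; simpa using hx

theorem pvSkipBlanks_eq_dropWhile (xs : List String) :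
    pvSkipBlanks xs = xs.dropWhile (fun l => PySem.Str.strip l == "") := by
  induction xs with
  | nil => rfl
  | cons l rest ih =>
    simp only [pvSkipBlanks, List.dropWhile_cons]
    by_cases h : PySem.Str.strip l = "" <;> simp [h, ih]

theorem pvSkipBlanks_head_not_blank {xs : List String} {l : String} {r : List String}
    (h : pvSkipBlanks xs = l :: r) : ¬ PySem.Str.strip l = "" := by
  rw [pvSkipBlanks_eq_dropWhile] at h
  have := pvDropWhileHead h
  simpa using this

theorem pvStrip_eq_nil_rstrip {s : String} (h : PySem.Str.strip s = "") :
    PySem.Str.rstrip s = "" := by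
  have hl : (PySem.Str.strip s).toList = [] := by rw [h]; rfl
  rw [PySem.Str.toList_strip] at hl
  unfold PySem.Chars.strip PySem.Chars.rstrip PySem.Chars.lstrip at hl
  have hall : ∀ c ∈ s.toList, PySem.Chars.isspace c = true := by
    rcases hd : List.dropWhile PySem.Chars.isspace s.toList with _ | ⟨a, t⟩
    · exact fun c hc => List.dropWhile_eq_nil_iff.mp hd c hc
    · exfalso
      have ha : PySem.Chars.isspace a = false := pvDropWhileHead hd
      rw [hd] at hl
      have hnil : List.dropWhile PySem.Chars.isspace (a :: t).reverse = [] := by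
        simpa using hl
      have := List.dropWhile_eq_nil_iff.mp hnil a (by simp)
      rw [ha] at this; exact Bool.false_ne_true this
  apply String.toList_eq_nil_iff.mp
  rw [PySem.Str.toList_rstrip]
  unfold PySem.Chars.rstrip
  have : List.dropWhile PySem.Chars.isspace s.toList.reverse = [] :=
    List.dropWhile_eq_nil_iff.mpr (fun c hc => hall c (List.mem_reverse.mp hc))
  simp [this]

theorem pvShouldMerge_of_blank {s : String} (h : PySem.Str.strip s = "") (x : String) :
    pvShouldMerge s x = false := by
  unfold pvShouldMerge
  rw [pvStrip_eq_nil_rstrip h]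
  simp

theorem pvGetLastD_append_right {m p : List String} (hp : p ≠ []) :
    (m ++ p).getLastD "" = p.getLastD "" := by
  rw [List.getLastD_eq_getLast?, List.getLastD_eq_getLast?, List.getLast?_append,
    List.getLast?_eq_some_getLast hp]
  rfl

theorem pvGetLastD_mem {p : List String} (hp : p ≠ []) : p.getLastD "" ∈ p := by
  rw [List.getLastD_eq_getLast?, List.getLast?_eq_some_getLast hp]
  exact List.getLast_mem hp

-- one-step equations for A's loop
theorem pvStepA_nonblank {line : String} (rs : List String) (merged : List String)
    (hb : ¬ PySem.Str.strip line = "") :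
    pvMergeLoopA (line :: rs) merged = pvMergeLoopA rs (merged ++ [line]) := by
  simp only [pvMergeLoopA]
  rw [if_neg (by simp [hb])]

theorem pvStepA_blank_dead {line : String} (rs : List String) (merged : List String)
    (hb : PySem.Str.strip line = "")
    (hno : ∀ l' r', pvSkipBlanks rs = l' :: r' →
      merged = [] ∨ pvShouldMerge (merged.getLastD "") l' = false) :
    pvMergeLoopA (line :: rs) merged = pvMergeLoopA rs (merged ++ [line]) := by
  by_cases hm : merged = []
  · subst hm
    simp only [pvMergeLoopA]
    rw [if_neg (by simp)]
  · simp only [pvMergeLoopA]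
    rw [if_pos (by simp [hb, hm])]
    split
    · rename_i l' r'' heq
      rcases hno l' r'' heq with h1 | h1
      · exact absurd h1 hm
      · rw [if_neg (by rw [h1]; simp)]
    · rfl

theorem pvStepA_blank_merge {line : String} (rs : List String) (merged : List String)
    {l' : String} {r'' : List String}
    (hb : PySem.Str.strip line = "") (hm : merged ≠ [])
    (heq : pvSkipBlanks rs = l' :: r'')
    (hs : pvShouldMerge (merged.getLastD "") l' = true) :
    pvMergeLoopA (line :: rs) merged =
      pvMergeLoopA r''
        (merged.dropLast ++
          [PySem.Str.rstrip (merged.getLastD "") ++ " " ++ PySem.Str.lstrip l']) := by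
  simp only [pvMergeLoopA]
  rw [if_pos (by simp [hb, hm])]
  split
  · rename_i a t hq
    rw [heq] at hq
    cases hq
    rw [if_pos hs]
  · rename_i hq
    rw [heq] at hq
    cases hq

-- pushing a block of blank lines through B's pass just moves them into the buffer
theorem pvGoB_blanks (bs : List String) (tail : List String) (merged pending : List String)
    (hb : ∀ b ∈ bs, PySem.Str.strip b = "") :
    pvGoB (bs ++ tail) (merged, pending) = pvGoB tail (merged, pending ++ bs) := by
  induction bs generalizing pending with
  | nil => simp
  | cons b bs ih =>
    have hb0 : PySem.Str.strip b = "" := hb b (by simp)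
    rw [List.cons_append, pvGoB_cons]
    have hstep : pvMergeStepB (merged, pending) b = (merged, pending ++ [b]) := by
      simp [pvMergeStepB, hb0]
    rw [hstep, ih (pending ++ [b]) (fun x hx => hb x (by simp [hx]))]
    simp

-- the combined invariant: A's loop equals B's pass, both from a clean state and
-- from a state where B holds a non-empty buffer of blanks that cannot cause a merge
theorem pvMain : ∀ (n : ℕ) (rest : List String), rest.length ≤ n →
    (∀ merged, pvMergeLoopA rest merged = pvGoB rest (merged, [])) ∧
    (∀ merged pending, pending ≠ [] → (∀ p ∈ pending, PySem.Str.strip p = "") →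
      (∀ l' r', pvSkipBlanks rest = l' :: r' →
        merged = [] ∨ pvShouldMerge (merged.getLastD "") l' = false) →
      pvMergeLoopA rest (merged ++ pending) = pvGoB rest (merged, pending)) := by
  intro n
  induction n with
  | zero =>
    intro rest hlen
    have : rest = [] := List.length_eq_zero_iff.mp (Nat.le_zero.mp hlen)
    subst this
    exact ⟨fun merged => by simp [pvMergeLoopA, pvGoB],
           fun merged pending _ _ _ => by simp [pvMergeLoopA, pvGoB]⟩
  | succ n ih =>
    intro rest hlen
    cases rest with
    | nil =>
      exact ⟨fun merged => by simp [pvMergeLoopA, pvGoB],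
             fun merged pending _ _ _ => by simp [pvMergeLoopA, pvGoB]⟩
    | cons line rs =>
      have hrs : rs.length ≤ n := by simpa using hlen
      constructor
      · -- clean-state part
        intro merged
        by_cases hb : PySem.Str.strip line = ""
        · have hstep : pvMergeStepB (merged, []) line = (merged, [line]) := by
            simp [pvMergeStepB, hb]
          by_cases hm : merged = []
          · subst hm
            rw [pvStepA_blank_dead rs [] hb (fun _ _ _ => Or.inl rfl), pvGoB_cons, hstep]
            have := (ih rs hrs).2 [] [line] (by simp) (by simp [hb]) (fun _ _ _ => Or.inl rfl)
            simpa using this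
          · rcases h : pvSkipBlanks rs with _ | ⟨l', r''⟩
            · rw [pvStepA_blank_dead rs merged hb
                (fun l2 r2 h2 => by rw [h] at h2; cases h2), pvGoB_cons, hstep]
              exact (ih rs hrs).2 merged [line] (by simp) (by simp [hb])
                (fun l2 r2 h2 => by rw [h] at h2; cases h2)
            · by_cases hs : pvShouldMerge (merged.getLastD "") l' = true
              · -- the merge branch
                rw [pvStepA_blank_merge rs merged hb hm h hs]
                have hdec : rs = rs.takeWhile (fun l => PySem.Str.strip l == "") ++ (l' :: r'') := by
                  conv_lhs => rw [← List.takeWhile_append_dropWhile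
                    (p := fun l => PySem.Str.strip l == "") (l := rs)]
                  rw [← pvSkipBlanks_eq_dropWhile, h]
                have hbsall : ∀ b ∈ rs.takeWhile (fun l => PySem.Str.strip l == ""),
                    PySem.Str.strip b = "" := by
                  intro b hmem
                  have hpb := List.mem_takeWhile_imp hmem
                  simpa using hpb
                have hB : pvGoB (line :: rs) (merged, []) =
                    pvGoB (l' :: r'')
                      (merged, [line] ++ rs.takeWhile (fun l => PySem.Str.strip l == "")) := by
                  rw [pvGoB_cons, hstep]
                  conv_lhs => rw [hdec]
                  exact pvGoB_blanks _ _ _ _ hbsall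
                rw [hB, pvGoB_cons]
                have hl'nb : ¬ PySem.Str.strip l' = "" := pvSkipBlanks_head_not_blank h
                have hstep2 : pvMergeStepB
                    (merged, [line] ++ rs.takeWhile (fun l => PySem.Str.strip l == "")) l' =
                    (merged.dropLast ++
                      [PySem.Str.rstrip (merged.getLastD "") ++ " " ++ PySem.Str.lstrip l'], []) := by
                  have hs' : pvShouldMerge (merged.getLast?.getD "") l' = true := by
                    rw [← List.getLastD_eq_getLast?]; exact hs
                  simp [pvMergeStepB, hl'nb, hm, hs']
                rw [hstep2]
                have hr'' : r''.length ≤ n := by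
                  have h1 := pvSkipBlanks_length_le rs
                  rw [h] at h1
                  simp at h1
                  omega
                exact (ih r'' hr'').1 _
              · -- merge check fails at the first blank of the run
                rw [pvStepA_blank_dead rs merged hb
                  (fun l2 r2 h2 => by
                    rw [h] at h2; cases h2
                    exact Or.inr (Bool.eq_false_iff.mpr hs)), pvGoB_cons, hstep]
                exact (ih rs hrs).2 merged [line] (by simp) (by simp [hb])
                  (fun l2 r2 h2 => by
                    rw [h] at h2; cases h2
                    exact Or.inr (Bool.eq_false_iff.mpr hs))
        · -- non-blank line, empty buffer: both append
          rw [pvStepA_nonblank rs merged hb, pvGoB_cons]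
          have hstep : pvMergeStepB (merged, []) line = (merged ++ [line], []) := by
            simp [pvMergeStepB, hb]
          rw [hstep]
          have := (ih rs hrs).1 (merged ++ [line])
          simpa using this
      · -- buffered part
        intro merged pending hp hblank hcond
        by_cases hb : PySem.Str.strip line = ""
        · -- another blank joins the buffer; the merge check sees a blank last line in A
          have hdead : ∀ l' r', pvSkipBlanks rs = l' :: r' →
              merged ++ pending = [] ∨
              pvShouldMerge ((merged ++ pending).getLastD "") l' = false := by
            intro l' r' _
            right
            have hlast : (merged ++ pending).getLastD "" = pending.getLastD "" :=
              pvGetLastD_append_right hp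
            have hblast : PySem.Str.strip ((merged ++ pending).getLastD "") = "" := by
              rw [hlast]; exact hblank _ (pvGetLastD_mem hp)
            exact pvShouldMerge_of_blank hblast l'
          rw [pvStepA_blank_dead rs (merged ++ pending) hb hdead, pvGoB_cons]
          have hstep : pvMergeStepB (merged, pending) line = (merged, pending ++ [line]) := by
            simp [pvMergeStepB, hb]
          rw [hstep, List.append_assoc]
          exact (ih rs hrs).2 merged (pending ++ [line]) (by simp)
            (fun p hmem => by
              rcases List.mem_append.mp hmem with h1 | h1
              · exact hblank p h1
              · simp at h1; subst h1; exact hb)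
            (fun l' r' h' => hcond l' r' (by simpa [pvSkipBlanks, hb] using h'))
        · -- the first non-blank line: B flushes, and the merge cannot fire by hcond
          have hcl : pvSkipBlanks (line :: rs) = line :: rs := by
            simp [pvSkipBlanks, hb]
          have hno := hcond line rs hcl
          rw [pvStepA_nonblank rs (merged ++ pending) hb, pvGoB_cons]
          have hstep : pvMergeStepB (merged, pending) line = (merged ++ pending ++ [line], []) := by
            rcases hno with hm | hs
            · subst hm; simp [pvMergeStepB, hb]
            · have hs' : pvShouldMerge (merged.getLast?.getD "") line = false := by
                rw [← List.getLastD_eq_getLast?]; exact hs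
              simp [pvMergeStepB, hb, hs']
          rw [hstep]
          have := (ih rs hrs).1 (merged ++ pending ++ [line])
          simpa using this

-- ===== VERDICT (by name: the statement is the Claim_ definition above) =====
theorem merge_split_paragraphs_spec : Claim_equal_merge_split_paragraphs := by
  intro text _
  unfold Spec_merge_split_paragraphs merge_split_paragraphs merge_split_paragraphs_alt
  have h := (pvMain (PySem.Str.splitlines text).length (PySem.Str.splitlines text) le_rfl).1 []
  rw [h]
  rfl
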